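-- pv_equiv track=rewrite | github.com/Laninthalesdran/Concept-as-Byte | PRIMARY_RESEARCH_PAPER/Project_Beta/8.9mBeta/train_8.9m.py | label_byte_sequence
-- ===== SOURCE A (Python) =====
-- CONTROL_BYTES = {
--     0x00: 'END', 0x01: 'BOUNDARY', 0x02: 'SPACE', 0x03: 'NEWLINE',
--     0x04: 'PARAGRAPH', 0x05: 'Q/A', 0x06: 'SKIP', 0x07: 'JALEKON',
--     0x08: 'NAME', 0x09: 'COIN',
-- }
--
-- def label_byte_sequence(byte_seq, table):
--     """Decode a byte sequence to human-readable concept labels using greedy longest match."""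
--     labels = []
--     i = 0
--     while i < len(byte_seq):
--         b = byte_seq[i]
--
--         # Control bytes
--         if b in CONTROL_BYTES:
--             labels.append((i, 1, f'[{CONTROL_BYTES[b]}]', 'control'))
--             i += 1
--             continue
--
--         # Greedy longest match: try 4, 3, 2, 1 byte codes
--         matched = False
--         for length in [4, 3, 2, 1]:
--             if i + length > len(byte_seq):
--                 continue
--             # Don't span across control bytes
--             span = byte_seq[i:i+length]
--             if any(s in CONTROL_BYTES for s in span[1:]):
--                 continue
--             hex_key = ''.join(f'{byte_seq[i+j]:02x}' for j in range(length))
--             if hex_key in table: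
--                 morpheme, english, entry_type = table[hex_key]
--                 labels.append((i, length, morpheme, entry_type))
--                 i += length
--                 matched = True
--                 break
--
--         if not matched:
--             labels.append((i, 1, f'0x{b:02x}', 'unknown'))
--             i += 1
--
--     return labels
-- ===== SOURCE B (Python) =====
-- CONTROL_BYTES = {
--     0x00: 'END', 0x01: 'BOUNDARY', 0x02: 'SPACE', 0x03: 'NEWLINE',
--     0x04: 'PARAGRAPH', 0x05: 'Q/A', 0x06: 'SKIP', 0x07: 'JALEKON',
--     0x08: 'NAME', 0x09: 'COIN',
-- }
--
-- def label_byte_sequence(byte_seq, table):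
--     """Decode a byte sequence to concept labels: walk a flattened prefix trie of the
--     table's keys instead of retrying fixed code lengths."""
--     # Flattened trie: the set of every nonempty prefix of every table key.
--     prefixes = set()
--     for key in table:
--         for t in range(1, len(key) + 1):
--             prefixes.add(key[:t])
--
--     labels = []
--     n = len(byte_seq)
--     i = 0
--     while i < n:
--         b = byte_seq[i]
--         if b in CONTROL_BYTES:
--             labels.append((i, 1, '[%s]' % CONTROL_BYTES[b], 'control'))
--             i += 1
--             continue
--         # Walk the trie: at most 4 bytes, never across an interior control byte,
--         # remembering the deepest full key seen; stop as soon as the hex string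
--         # built so far prefixes no table key.
--         best = None
--         key = ''
--         j = 0
--         while j < 4 and i + j < n and (j == 0 or byte_seq[i + j] not in CONTROL_BYTES):
--             key += format(byte_seq[i + j], '02x')
--             j += 1
--             if key in table:
--                 best = (j, table[key])
--             if key not in prefixes:
--                 break
--         if best is None:
--             labels.append((i, 1, '0x' + format(b, '02x'), 'unknown'))
--             i += 1
--         else:
--             L, (morpheme, english, entry_type) = best
--             labels.append((i, L, morpheme, entry_type))
--             i += L
--     return labels
-- ===== Notes on version B (the rewrite author's own statement) =====
-- stated objective: alternative
-- what changed: A retries fixed code lengths 4,3,2,1 at every position, rebuilding a slice and a joined hex key per attempt; B preprocesses the table into a flattened prefix trie (the set of all nonempty key prefixes) and makes a single incremental left-to-right walk per position, extending the key byte by byte and stopping as soon as it prefixes no table key.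
import Mathlib
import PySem

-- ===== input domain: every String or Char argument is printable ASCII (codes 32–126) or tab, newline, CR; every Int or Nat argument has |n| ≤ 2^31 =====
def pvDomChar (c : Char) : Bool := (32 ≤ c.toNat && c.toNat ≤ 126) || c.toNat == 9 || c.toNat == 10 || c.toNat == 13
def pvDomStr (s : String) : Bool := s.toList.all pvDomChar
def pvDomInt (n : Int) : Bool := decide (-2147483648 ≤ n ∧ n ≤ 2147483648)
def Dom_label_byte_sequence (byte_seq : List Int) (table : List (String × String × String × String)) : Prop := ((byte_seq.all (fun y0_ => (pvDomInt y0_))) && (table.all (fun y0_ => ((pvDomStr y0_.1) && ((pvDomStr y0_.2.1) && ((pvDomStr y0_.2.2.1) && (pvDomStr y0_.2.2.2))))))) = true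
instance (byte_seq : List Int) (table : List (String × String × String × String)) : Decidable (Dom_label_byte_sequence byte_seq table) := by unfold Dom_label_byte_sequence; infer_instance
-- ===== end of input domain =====

-- B replaces A's per-position retry of fixed code lengths (4,3,2,1, each with a fresh
-- slice/join) by one left-to-right walk of a flattened prefix trie of the table's keys
-- (alternative decomposition, same asymptotic cost).

-- shared helpers: both Pythons call the same built-ins (format(b, '02x'), the
-- CONTROL_BYTES module constant), so both ports share these transliterations.

def pvHexDigit (n : Nat) : Char := if n < 10 then Char.ofNat (48 + n) else Char.ofNat (87 + n)

-- lower-case hex digits of a natural number, most significant first (no sign, no padding)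
def pvHexNat (n : Nat) : List Char :=
  if _h : n < 16 then [pvHexDigit n]
  else pvHexNat (n / 16) ++ [pvHexDigit (n % 16)]
  termination_by n
  decreasing_by exact Nat.div_lt_self (by omega) (by omega)

-- exact port of format(b, '02x') / f'{b:02x}' (zero-pad to width 2; '-' then digits for
-- negatives, which already reach width 2 and are never padded)
def pvHex02 (b : Int) : String :=
  if b < 0 then String.ofList ('-' :: pvHexNat b.natAbs)
  else if (pvHexNat b.toNat).length < 2 then String.ofList ('0' :: pvHexNat b.toNat)
  else String.ofList (pvHexNat b.toNat)

def CONTROL_BYTES : PySem.Dict Int String := PySem.Dict.mk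
  [(0x00, "END"), (0x01, "BOUNDARY"), (0x02, "SPACE"), (0x03, "NEWLINE"),
   (0x04, "PARAGRAPH"), (0x05, "Q/A"), (0x06, "SKIP"), (0x07, "JALEKON"),
   (0x08, "NAME"), (0x09, "COIN")]

-- ===== PORT A =====

-- ''.join(f'{byte_seq[i+j]:02x}' for j in range(length))  (indices guarded by i+length<=len)
def pvKeyA (byte_seq : List Int) (i L : Nat) : String :=
  PySem.Str.join "" ((PySem.List.pyRange 0 (L : Int) 1).map
    (fun j => pvHex02 (PySem.List.pyGetD byte_seq ((i : Int) + j) 0)))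

-- the 'for length in [4, 3, 2, 1]: … break' loop of A
def pvTryA (byte_seq : List Int) (table : List (String × String × String × String)) (i : Nat) :
    List Nat → Option (Nat × (String × String × String))
  | [] => none
  | L :: rest =>
    if (i : Int) + (L : Int) > (byte_seq.length : Int) then pvTryA byte_seq table i rest
    else if ((PySem.List.slice (PySem.List.slice byte_seq (some (i : Int)) (some ((i : Int) + (L : Int)))) (some 1) none).any
              (fun s => CONTROL_BYTES.contains s)) then pvTryA byte_seq table i rest
    else match (PySem.Dict.mk table).get? (pvKeyA byte_seq i L) with
      | some v => some (L, v)
      | none => pvTryA byte_seq table i rest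

def pvLoopA (byte_seq : List Int) (table : List (String × String × String × String)) :
    Nat → Nat → List (Int × Int × String × String)
  | 0, _ => []  -- fuel guard only: called with fuel = byte_seq.length, and i advances ≥ 1 per step
  | fuel + 1, i =>
    if i < byte_seq.length then
      let b := PySem.List.pyGetD byte_seq (i : Int) 0
      if CONTROL_BYTES.contains b then
        ((i : Int), 1, "[" ++ CONTROL_BYTES.getD b "" ++ "]", "control") :: pvLoopA byte_seq table fuel (i + 1)
      else
        match pvTryA byte_seq table i [4, 3, 2, 1] with
        | some Lv => ((i : Int), (Lv.1 : Int), Lv.2.1, Lv.2.2.2) :: pvLoopA byte_seq table fuel (i + Lv.1)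
        | none => ((i : Int), 1, "0x" ++ pvHex02 b, "unknown") :: pvLoopA byte_seq table fuel (i + 1)
    else []

def label_byte_sequence (byte_seq : List Int) (table : List (String × String × String × String)) : List (Int × Int × String × String) :=
  pvLoopA byte_seq table byte_seq.length 0

-- ===== PORT B =====

-- flattened trie: the set of every nonempty prefix of every table key
def pvPrefixes (table : List (String × String × String × String)) : PySem.Set String :=
  table.foldl (fun s kv =>
    (PySem.List.pyRange 1 (PySem.Str.len kv.1 + 1) 1).foldl
      (fun s t => PySem.Set.add s (PySem.Str.slice kv.1 none (some t))) s) PySem.Set.empty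

-- the inner 'while j < 4 and …' trie walk of B
def pvWalkB (byte_seq : List Int) (table : List (String × String × String × String))
    (prefixes : PySem.Set String) (i : Nat) :
    Nat → Nat → String → Option (Nat × (String × String × String)) → Option (Nat × (String × String × String))
  | 0, _, _, best => best  -- fuel guard only: called with fuel = 4 and the walk does at most 4 steps (j < 4)
  | fuel + 1, j, key, best =>
    if j < 4 ∧ i + j < byte_seq.length ∧
        (j = 0 ∨ CONTROL_BYTES.contains (PySem.List.pyGetD byte_seq ((i : Int) + (j : Int)) 0) = false) then
      let key' := key ++ pvHex02 (PySem.List.pyGetD byte_seq ((i : Int) + (j : Int)) 0)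
      let best' := match (PySem.Dict.mk table).get? key' with
        | some v => some (j + 1, v)
        | none => best
      if prefixes.contains key' then pvWalkB byte_seq table prefixes i fuel (j + 1) key' best' else best'
    else best

def pvLoopB (byte_seq : List Int) (table : List (String × String × String × String))
    (prefixes : PySem.Set String) : Nat → Nat → List (Int × Int × String × String)
  | 0, _ => []  -- fuel guard only: called with fuel = byte_seq.length, and i advances ≥ 1 per step
  | fuel + 1, i =>
    if i < byte_seq.length then
      let b := PySem.List.pyGetD byte_seq (i : Int) 0
      if CONTROL_BYTES.contains b then
        ((i : Int), 1, "[" ++ CONTROL_BYTES.getD b "" ++ "]", "control") :: pvLoopB byte_seq table prefixes fuel (i + 1)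
      else
        match pvWalkB byte_seq table prefixes i 4 0 "" none with
        | some Lv => ((i : Int), (Lv.1 : Int), Lv.2.1, Lv.2.2.2) :: pvLoopB byte_seq table prefixes fuel (i + Lv.1)
        | none => ((i : Int), 1, "0x" ++ pvHex02 b, "unknown") :: pvLoopB byte_seq table prefixes fuel (i + 1)
    else []

def label_byte_sequence_alt (byte_seq : List Int) (table : List (String × String × String × String)) : List (Int × Int × String × String) :=
  pvLoopB byte_seq table (pvPrefixes table) byte_seq.length 0

-- ===== PRECONDITION & SPEC =====
def Spec_label_byte_sequence (byte_seq : List Int) (table : List (String × String × String × String)) (out : List (Int × Int × String × String)) : Prop := out = label_byte_sequence_alt byte_seq table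
instance (byte_seq : List Int) (table : List (String × String × String × String)) (out : List (Int × Int × String × String)) : Decidable (Spec_label_byte_sequence byte_seq table out) := by unfold Spec_label_byte_sequence; infer_instance

-- ===== CLAIM (what is proved, stated in full; the proofs are below) =====
def Claim_equal_label_byte_sequence : Prop := ∀ (byte_seq : List Int) (table : List (String × String × String × String)), Dom_label_byte_sequence byte_seq table → Spec_label_byte_sequence byte_seq table (label_byte_sequence byte_seq table)

-- ===== LEMMAS AND PROOFS =====

-- reference description of the greedy match both ports compute at position i

def pvCtrl (seq : List Int) (p : Nat) : Bool := CONTROL_BYTES.contains (seq.getD p 0)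

def pvAllowed (seq : List Int) (i L : Nat) : Bool :=
  decide (i + L ≤ seq.length) && (List.range L).all (fun k => decide (k = 0) || !pvCtrl seq (i + k))

def pvHit (seq : List Int) (table : List (String × String × String × String)) (i L : Nat) :
    Option (String × String × String) :=
  (PySem.Dict.mk table).get? (pvKeyA seq i L)

def pvBest (seq : List Int) (table : List (String × String × String × String)) (i : Nat) :
    Nat → Option (Nat × (String × String × String))
  | 0 => none
  | j + 1 =>
    match (if pvAllowed seq i (j + 1) then pvHit seq table i (j + 1) else none) with
    | some v => some (j + 1, v)
    | none => pvBest seq table i j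

def pvFirst (seq : List Int) (table : List (String × String × String × String)) (i : Nat) :
    List Nat → Option (Nat × (String × String × String))
  | [] => none
  | L :: rest =>
    match (if pvAllowed seq i L then pvHit seq table i L else none) with
    | some v => some (L, v)
    | none => pvFirst seq table i rest

theorem pvHexNat_ne_nil (n : Nat) : pvHexNat n ≠ [] := by
  unfold pvHexNat; split <;> simp

theorem pvHex02_toList_ne_nil (b : Int) : (pvHex02 b).toList ≠ [] := by
  unfold pvHex02; split_ifs <;> simp [pvHexNat_ne_nil]

theorem chars_join_nil (cs : List (List Char)) : PySem.Chars.join [] cs = cs.flatten := by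
  simp only [PySem.Chars.join]
  induction cs with
  | nil => rfl
  | cons a t ih =>
    cases t with
    | nil => simp [List.intercalate]
    | cons b u => simp_all [List.intercalate, List.intersperse]

theorem pvKeyA_toList (seq : List Int) (i L : Nat) :
    (pvKeyA seq i L).toList = ((List.range L).map (fun k => (pvHex02 (seq.getD (i + k) 0)).toList)).flatten := by
  unfold pvKeyA
  rw [PySem.Str.toList_join]
  have h0 : ("" : String).toList = [] := rfl
  rw [h0, chars_join_nil, PySem.List.pyRange_zero_nat, List.map_map, List.map_map]
  congr 1
  apply List.map_congr_left
  intro k _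
  have hc : (i : Int) + (k : Int) = ((i + k : Nat) : Int) := by push_cast; ring
  show (pvHex02 (PySem.List.pyGetD seq ((i : Int) + (k : Int)) 0)).toList = _
  rw [hc, PySem.List.pyGetD_natCast]

theorem pvKeyA_zero (seq : List Int) (i : Nat) : pvKeyA seq i 0 = "" := by
  apply String.toList_inj.mp
  rw [pvKeyA_toList]; rfl

theorem pvKeyA_succ (seq : List Int) (i L : Nat) :
    pvKeyA seq i (L + 1) = pvKeyA seq i L ++ pvHex02 (seq.getD (i + L) 0) := by
  apply String.toList_inj.mp
  rw [String.toList_append, pvKeyA_toList, pvKeyA_toList, List.range_succ]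
  simp

theorem pvKeyA_toList_len_pos (seq : List Int) (i L : Nat) (hL : 1 ≤ L) :
    1 ≤ (pvKeyA seq i L).toList.length := by
  obtain ⟨m, rfl⟩ : ∃ m, L = m + 1 := ⟨L - 1, by omega⟩
  rw [pvKeyA_succ]
  have h2 : 0 < (pvHex02 (seq.getD (i + m) 0)).toList.length :=
    List.length_pos_iff.mpr (pvHex02_toList_ne_nil (seq.getD (i + m) 0))
  rw [String.toList_append, List.length_append]
  omega

theorem pvKeyA_append (seq : List Int) (i j L : Nat) (h : j ≤ L) :
    ∃ r : String, pvKeyA seq i L = pvKeyA seq i j ++ r := by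
  induction L with
  | zero =>
    have hj0 : j = 0 := by omega
    subst hj0
    exact ⟨"", by simp⟩
  | succ m ih =>
    rcases Nat.eq_or_lt_of_le h with h' | h'
    · exact ⟨"", by subst h'; simp⟩
    · obtain ⟨r, hr⟩ := ih (by omega)
      exact ⟨r ++ pvHex02 (seq.getD (i + m) 0), by rw [pvKeyA_succ, hr, String.append_assoc]⟩

-- a slice of the list equals the map of getD over a range (indices in bounds)
theorem take_drop_eq_map_range (seq : List Int) (a m : Nat) (h : a + m ≤ seq.length) :
    (seq.drop a).take m = (List.range m).map (fun k => seq.getD (a + k) 0) := by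
  apply List.ext_getElem
  · simp only [List.length_take, List.length_drop, List.length_map, List.length_range]
    omega
  · intro k h1 h2
    simp only [List.getElem_take, List.getElem_drop, List.getElem_map, List.getElem_range]
    rw [List.getD_eq_getElem]

-- A's 'any control in span[1:]' test, in terms of pvAllowed's per-index form
theorem span_ctrl_eq (seq : List Int) (i L : Nat) (hL : 1 ≤ L) (h : i + L ≤ seq.length) :
    ((PySem.List.slice (PySem.List.slice seq (some (i : Int)) (some ((i : Int) + (L : Int)))) (some 1) none).any
      (fun s => CONTROL_BYTES.contains s))
    = !((List.range L).all (fun k => decide (k = 0) || !pvCtrl seq (i + k))) := by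
  obtain ⟨m, rfl⟩ : ∃ m, L = m + 1 := ⟨L - 1, by omega⟩
  have hc : (i : Int) + ((m + 1 : Nat) : Int) = ((i + (m + 1) : Nat) : Int) := by push_cast; ring
  rw [hc, PySem.List.slice_natCast, PySem.List.slice_from_one]
  have h1 : i + (m + 1) - i = m + 1 := by omega
  rw [h1, ← List.drop_one, List.drop_take, List.drop_drop]
  have h2 : m + 1 - 1 = m := by omega
  rw [h2, take_drop_eq_map_range seq (i + 1) m (by omega), List.range_succ_eq_map]
  simp only [List.all_cons, List.any_map, List.all_map]
  simp only [pvCtrl]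
  have : ∀ k : Nat, i + 1 + k = i + (k + 1) := by omega
  simp only [this]
  rw [List.any_eq_not_all_not]
  simp [Function.comp_def]

theorem pvTryA_eq_pvFirst (seq : List Int) (table : List (String × String × String × String))
    (i : Nat) (ls : List Nat) (hls : ∀ L ∈ ls, 1 ≤ L) :
    pvTryA seq table i ls = pvFirst seq table i ls := by
  induction ls with
  | nil => rfl
  | cons L rest ih =>
    have hL : 1 ≤ L := hls L (by simp)
    have ihr := ih (fun x hx => hls x (by simp [hx]))
    rw [pvTryA, pvFirst]
    by_cases hlen : i + L ≤ seq.length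
    · have hnot : ¬ ((i : Int) + (L : Int) > (seq.length : Int)) := by push_cast; omega
      rw [if_neg hnot, span_ctrl_eq seq i L hL hlen]
      by_cases hctrl : (List.range L).all (fun k => decide (k = 0) || !pvCtrl seq (i + k)) = true
      · have hall : pvAllowed seq i L = true := by
          simp only [pvAllowed, Bool.and_eq_true, decide_eq_true_eq]
          exact ⟨hlen, hctrl⟩
        rw [hctrl, hall]
        unfold pvHit
        cases hget : (PySem.Dict.mk table).get? (pvKeyA seq i L) <;> simp [ihr]
      · simp only [Bool.not_eq_true] at hctrl
        have hall : pvAllowed seq i L = false := by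
          simp [pvAllowed, hctrl]
        rw [hctrl, hall]
        simp [ihr]
    · have hgt : ((i : Int) + (L : Int) > (seq.length : Int)) := by push_cast; omega
      rw [if_pos hgt]
      have hall : pvAllowed seq i L = false := by
        simp only [pvAllowed, Bool.and_eq_false_iff]
        left; simpa using hlen
      rw [hall]
      simp [ihr]

theorem pvFirst_4321 (seq : List Int) (table : List (String × String × String × String)) (i : Nat) :
    pvFirst seq table i [4, 3, 2, 1] = pvBest seq table i 4 := rfl

theorem pvBest_ext (seq : List Int) (table : List (String × String × String × String)) (i : Nat)
    (m j : Nat) (hj : j ≤ m)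
    (h : ∀ L, j < L → L ≤ m → pvAllowed seq i L = true → pvHit seq table i L = none) :
    pvBest seq table i m = pvBest seq table i j := by
  induction m with
  | zero =>
    have hj0 : j = 0 := by omega
    subst hj0
    rfl
  | succ m ih =>
    rcases Nat.eq_or_lt_of_le hj with h' | h'
    · subst h'; rfl
    · have hguard : (if pvAllowed seq i (m + 1) then pvHit seq table i (m + 1) else none) = none := by
        cases ha : pvAllowed seq i (m + 1) with
        | true => simpa using h (m + 1) (by omega) (le_refl _) ha
        | false => simp
      show (match (if pvAllowed seq i (m + 1) then pvHit seq table i (m + 1) else none) with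
        | some v => some (m + 1, v)
        | none => pvBest seq table i m) = pvBest seq table i j
      rw [hguard]
      exact ih (by omega) (fun L h1 h2 h3 => h L h1 (by omega) h3)

theorem mem_pvPrefixes (table : List (String × String × String × String)) (y : String) :
    y ∈ pvPrefixes table ↔
      ∃ kv ∈ table, ∃ t : Int, (1 ≤ t ∧ t < PySem.Str.len kv.1 + 1) ∧
        y = PySem.Str.slice kv.1 none (some t) := by
  have gen : ∀ (tb : List (String × String × String × String)) (s0 : PySem.Set String),
      y ∈ tb.foldl (fun s kv =>
        (PySem.List.pyRange 1 (PySem.Str.len kv.1 + 1) 1).foldl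
          (fun s t => PySem.Set.add s (PySem.Str.slice kv.1 none (some t))) s) s0
      ↔ y ∈ s0 ∨ ∃ kv ∈ tb, ∃ t : Int, (1 ≤ t ∧ t < PySem.Str.len kv.1 + 1) ∧
          y = PySem.Str.slice kv.1 none (some t) := by
    intro tb
    induction tb with
    | nil => simp
    | cons a rest ih =>
      intro s0
      rw [List.foldl_cons, ih]
      rw [PySem.Set.mem_foldl_add ((PySem.List.pyRange 1 (PySem.Str.len a.1 + 1) 1))
        (fun t => PySem.Str.slice a.1 none (some t)) s0 y]
      constructor
      · rintro (⟨hy | ⟨t, ht, rfl⟩⟩ | ⟨kv, hkv, t, ht, rfl⟩)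
        · exact Or.inl hy
        · exact Or.inr ⟨a, by simp, t, by simpa [PySem.List.mem_pyRange_one, PySem.Str.len_eq] using ht, rfl⟩
        · exact Or.inr ⟨kv, by simp [hkv], t, ht, rfl⟩
      · rintro (hy | ⟨kv, hkv, t, ht, rfl⟩)
        · exact Or.inl (Or.inl hy)
        · rcases List.mem_cons.mp hkv with rfl | hkv'
          · exact Or.inl (Or.inr ⟨t, by rw [PySem.List.mem_pyRange_one]; exact ht, rfl⟩)
          · exact Or.inr ⟨kv, hkv', t, ht, rfl⟩
  rw [pvPrefixes, gen]
  simp [PySem.Set.empty]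

theorem get?_mk_some {ν : Type} (l : List (String × ν)) (k : String) (v : ν)
    (h : (PySem.Dict.mk l).get? k = some v) : ∃ p ∈ l, p.1 = k := by
  induction l with
  | nil => simp [PySem.Dict.get?] at h
  | cons a rest ih =>
    obtain ⟨k0, v0⟩ := a
    rw [PySem.Dict.get?_mk_cons] at h
    by_cases hbeq : (k0 == k) = true
    · exact ⟨(k0, v0), by simp, eq_of_beq hbeq⟩
    · rw [if_neg hbeq] at h
      obtain ⟨p, hp, hpk⟩ := ih h
      exact ⟨p, by simp [hp], hpk⟩

theorem pvAllowed_succ (seq : List Int) (i j : Nat) (hj : pvAllowed seq i j = true)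
    (hlen : i + j < seq.length) (hc : j = 0 ∨ pvCtrl seq (i + j) = false) :
    pvAllowed seq i (j + 1) = true := by
  simp only [pvAllowed, Bool.and_eq_true, decide_eq_true_eq, List.all_eq_true] at hj ⊢
  refine ⟨by omega, ?_⟩
  intro k hk
  rw [List.mem_range] at hk
  by_cases hkj : k < j
  · exact hj.2 k (List.mem_range.mpr hkj)
  · have hkje : k = j := by omega
    subst hkje
    rcases hc with h0 | hctrl
    · subst h0; simp
    · simp [hctrl]

theorem hit_prefix (seq : List Int) (table : List (String × String × String × String))
    (i j L : Nat) (hj : 1 ≤ j) (hjL : j ≤ L) (v : String × String × String)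
    (hv : pvHit seq table i L = some v) :
    (pvPrefixes table).contains (pvKeyA seq i j) = true := by
  obtain ⟨p, hp, hpk⟩ := get?_mk_some table (pvKeyA seq i L) v hv
  obtain ⟨r, hr⟩ := pvKeyA_append seq i j L hjL
  rw [PySem.Set.contains_iff, mem_pvPrefixes]
  have hlen1 := pvKeyA_toList_len_pos seq i j hj
  refine ⟨p, hp, ((pvKeyA seq i j).toList.length : Int), ⟨by exact_mod_cast hlen1, ?_⟩, ?_⟩
  · rw [hpk, hr, PySem.Str.len_eq, String.toList_append, List.length_append]
    push_cast; omega
  · apply String.toList_inj.mp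
    rw [PySem.Str.toList_slice, PySem.Chars.slice_eq_listSlice, PySem.List.slice_to_natCast,
      hpk, hr, String.toList_append, List.take_left]

theorem pvWalk_eq (seq : List Int) (table : List (String × String × String × String)) (i : Nat) :
    ∀ fuel j, j + fuel = 4 → pvAllowed seq i j = true →
      pvWalkB seq table (pvPrefixes table) i fuel j (pvKeyA seq i j) (pvBest seq table i j)
        = pvBest seq table i 4 := by
  intro fuel
  induction fuel with
  | zero =>
    intro j hd _
    have hj : j = 4 := by omega
    subst hj
    rfl
  | succ fuel ih =>
    intro j hd hall
    rw [pvWalkB]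
    by_cases hcond : j < 4 ∧ i + j < seq.length ∧
        (j = 0 ∨ CONTROL_BYTES.contains (PySem.List.pyGetD seq ((i : Int) + (j : Int)) 0) = false)
    · rw [if_pos hcond]
      have hcast : (i : Int) + (j : Int) = ((i + j : Nat) : Int) := by push_cast; ring
      have hbyte : PySem.List.pyGetD seq ((i : Int) + (j : Int)) 0 = seq.getD (i + j) 0 := by
        rw [hcast, PySem.List.pyGetD_natCast]
      have hall1 : pvAllowed seq i (j + 1) = true := by
        apply pvAllowed_succ seq i j hall hcond.2.1
        rcases hcond.2.2 with h0 | hc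
        · exact Or.inl h0
        · exact Or.inr (by rw [pvCtrl, ← hbyte]; exact hc)
      have hkey : pvKeyA seq i j ++ pvHex02 (PySem.List.pyGetD seq ((i : Int) + (j : Int)) 0)
          = pvKeyA seq i (j + 1) := by rw [hbyte, pvKeyA_succ]
      have hbest : (match (PySem.Dict.mk table).get? (pvKeyA seq i (j + 1)) with
          | some v => some (j + 1, v)
          | none => pvBest seq table i j) = pvBest seq table i (j + 1) := by
        conv_rhs => rw [pvBest]
        rw [hall1]
        simp [pvHit]
      simp only [hkey, hbest]
      by_cases hpfx : (pvPrefixes table).contains (pvKeyA seq i (j + 1)) = true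
      · rw [if_pos hpfx]
        exact ih (j + 1) (by omega) hall1
      · rw [if_neg hpfx]
        refine (pvBest_ext seq table i 4 (j + 1) (by omega) ?_).symm
        intro L h1 h2 h3
        cases hhit : pvHit seq table i L with
        | none => rfl
        | some v => exact absurd (hit_prefix seq table i (j + 1) L (by omega) (by omega) v hhit) hpfx
    · rw [if_neg hcond]
      refine (pvBest_ext seq table i 4 j (by omega) ?_).symm
      intro L h1 h2 h3
      exfalso
      rcases Decidable.not_and_iff_not_or_not.mp hcond with hj | hcond2
      · omega
      rcases Decidable.not_and_iff_not_or_not.mp hcond2 with hlen | hctrl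
      · simp only [pvAllowed, Bool.and_eq_true, decide_eq_true_eq] at h3
        omega
      · push_neg at hctrl
        obtain ⟨hj0, hc⟩ := hctrl
        have hcast : (i : Int) + (j : Int) = ((i + j : Nat) : Int) := by push_cast; ring
        rw [hcast, PySem.List.pyGetD_natCast] at hc
        simp only [pvAllowed, Bool.and_eq_true, decide_eq_true_eq, List.all_eq_true] at h3
        have := h3.2 j (List.mem_range.mpr (by omega))
        rcases Bool.or_eq_true_iff.mp this with h | h
        · exact hj0 (by simpa using h)
        · rw [pvCtrl] at h
          exact hc (by simpa using h)

theorem pvLoop_eq (seq : List Int) (table : List (String × String × String × String)) :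
    ∀ fuel i, pvLoopA seq table fuel i = pvLoopB seq table (pvPrefixes table) fuel i := by
  intro fuel
  induction fuel with
  | zero => intro i; rfl
  | succ fuel ih =>
    intro i
    rw [pvLoopA, pvLoopB]
    by_cases hi : i < seq.length
    · rw [if_pos hi, if_pos hi]
      dsimp only
      by_cases hc : CONTROL_BYTES.contains (PySem.List.pyGetD seq (i : Int) 0) = true
      · rw [if_pos hc, if_pos hc, ih (i + 1)]
      · rw [if_neg hc, if_neg hc]
        have htry : pvTryA seq table i [4, 3, 2, 1] = pvBest seq table i 4 := by
          rw [pvTryA_eq_pvFirst seq table i [4, 3, 2, 1] (by intro L hL; fin_cases hL <;> omega),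
            pvFirst_4321]
        have hall0 : pvAllowed seq i 0 = true := by
          simp only [pvAllowed, List.range_zero, List.all_nil, Bool.and_true,
            decide_eq_true_eq]
          omega
        have hwalk : pvWalkB seq table (pvPrefixes table) i 4 0 "" none = pvBest seq table i 4 := by
          have := pvWalk_eq seq table i 4 0 (by omega) hall0
          rwa [pvKeyA_zero] at this
        rw [htry, hwalk]
        cases hres : pvBest seq table i 4 with
        | none => simp only [ih (i + 1)]
        | some Lv => simp only [ih (i + Lv.1)]
    · rw [if_neg hi, if_neg hi]

-- ===== VERDICT (by name: the statement is the Claim_ definition above) =====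
theorem label_byte_sequence_spec : Claim_equal_label_byte_sequence := by
  intro byte_seq table _
  unfold Spec_label_byte_sequence label_byte_sequence label_byte_sequence_alt
  exact pvLoop_eq byte_seq table byte_seq.length 0
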